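-- pv_equiv track=rewrite | github.com/som1tokmynam/Helpful-scripts-dataset | DatasetToolkit/tools/fix_thinking_turns.py | merge_misplaced_thinking_blocks
-- ===== SOURCE A (Python) =====
-- def merge_misplaced_thinking_blocks(conversations):
--     """
--     PASS 2: Finds and merges a misplaced 'human' turn (containing a thinking block)
--     into the correct 'gpt' turn. This is the logic from the V3 script.
--     """
--     merged_conversations = []
--     i = 0
--     was_merged = False
--
--     while i < len(conversations):
--         if i + 2 < len(conversations):
--             turn1, turn2, turn3 = conversations[i], conversations[i+1], conversations[i+2]
--
--             t1_from = turn1.get('from', '')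
--             t1_val = turn1.get('value', '').strip()
--             t2_from = turn2.get('from', '')
--             t2_val = turn2.get('value', '').strip()
--             t3_from = turn3.get('from', '')
--
--             is_pattern = (
--                 t1_from == 'gpt' and t1_val == '<thinking>' and
--                 t2_from == 'human' and t2_val.endswith('</thinking>') and not t2_val.startswith('<thinking>') and
--                 t3_from == 'gpt'
--             )
--
--             if is_pattern:
--                 was_merged = True
--                 thinking_block = f"<thinking>\n{turn2.get('value', '').strip()}\n"
--                 main_response = turn3.get('value', '')
--                 combined_value = f"{thinking_block}{main_response}"
--
--                 merged_conversations.append({'from': 'gpt', 'value': combined_value})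
--                 i += 3
--                 continue
--
--         merged_conversations.append(conversations[i])
--         i += 1
--
--     return merged_conversations, was_merged
-- ===== SOURCE B (Python) =====
-- def merge_misplaced_thinking_blocks(conversations):
--     """Streaming state machine: one for-loop over the turns with a lookbehind
--     buffer of at most two pending turns, instead of A's index-walking lookahead
--     window. When the buffer fills to three, either flush the merged gpt turn or
--     emit the oldest pending turn."""
--     out = []
--     buf = []
--     merged = False
--     for turn in conversations:
--         buf.append(turn)
--         if len(buf) == 3:
--             t1, t2, t3 = buf
--             t2_val = t2.get('value', '').strip()
--             if (t1.get('from', '') == 'gpt'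
--                     and t1.get('value', '').strip() == '<thinking>'
--                     and t2.get('from', '') == 'human'
--                     and t2_val.endswith('</thinking>')
--                     and not t2_val.startswith('<thinking>')
--                     and t3.get('from', '') == 'gpt'):
--                 out.append({'from': 'gpt',
--                             'value': f"<thinking>\n{t2.get('value', '').strip()}\n{t3.get('value', '')}"})
--                 merged = True
--                 buf = []
--             else:
--                 out.append(buf.pop(0))
--     out.extend(buf)
--     return out, merged
-- ===== Notes on version B (the rewrite author's own statement) =====
-- stated objective: alternative
-- what changed: A walks an index over the list and looks ahead three positions to merge in place; B is a streaming state machine: one for-loop over the turns pushing into a lookbehind buffer of at most two pending turns, flushing a merged turn or the oldest pending turn whenever the buffer fills to three, and appending the leftover buffer at the end.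
import Mathlib
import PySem

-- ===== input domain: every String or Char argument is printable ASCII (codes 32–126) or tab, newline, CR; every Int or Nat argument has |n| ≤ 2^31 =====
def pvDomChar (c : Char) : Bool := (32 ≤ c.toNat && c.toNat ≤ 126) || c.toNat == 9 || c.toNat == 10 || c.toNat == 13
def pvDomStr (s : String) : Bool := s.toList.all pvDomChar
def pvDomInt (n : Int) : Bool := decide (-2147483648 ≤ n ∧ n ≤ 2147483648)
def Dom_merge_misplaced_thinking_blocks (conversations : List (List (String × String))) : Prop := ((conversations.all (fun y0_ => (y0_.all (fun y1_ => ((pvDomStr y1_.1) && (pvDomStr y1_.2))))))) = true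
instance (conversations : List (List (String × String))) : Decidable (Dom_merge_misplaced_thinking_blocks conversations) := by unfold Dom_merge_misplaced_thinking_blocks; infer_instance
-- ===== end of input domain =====

-- B replaces A's index-walking three-turn lookahead loop by a streaming state machine:
-- one fold over the turns with a lookbehind buffer of at most two pending turns.

-- ===== PORT A =====
-- A's while loop; conversations[i] (always in range when read) is List.getD i [].
def mergeLoopA (conversations : List (List (String × String))) (i : Nat)
    (acc : List (List (String × String))) (wm : Bool) :
    (List (List (String × String))) × Bool :=
  if _h : i < conversations.length then
    if i + 2 < conversations.length then
      let turn1 := conversations.getD i []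
      let turn2 := conversations.getD (i+1) []
      let turn3 := conversations.getD (i+2) []
      let t1_from := PySem.Dict.getD ⟨turn1⟩ "from" ""
      let t1_val := PySem.Str.strip (PySem.Dict.getD ⟨turn1⟩ "value" "")
      let t2_from := PySem.Dict.getD ⟨turn2⟩ "from" ""
      let t2_val := PySem.Str.strip (PySem.Dict.getD ⟨turn2⟩ "value" "")
      let t3_from := PySem.Dict.getD ⟨turn3⟩ "from" ""
      let is_pattern :=
        t1_from == "gpt" && t1_val == "<thinking>" &&
        t2_from == "human" && PySem.Str.endswith t2_val "</thinking>" &&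
        !(PySem.Str.startswith t2_val "<thinking>") &&
        t3_from == "gpt"
      if is_pattern then
        let thinking_block := "<thinking>" ++ "\n" ++ PySem.Str.strip (PySem.Dict.getD ⟨turn2⟩ "value" "") ++ "\n"
        let main_response := PySem.Dict.getD ⟨turn3⟩ "value" ""
        let combined_value := thinking_block ++ main_response
        mergeLoopA conversations (i+3) (acc ++ [[("from","gpt"),("value",combined_value)]]) true
      else
        mergeLoopA conversations (i+1) (acc ++ [conversations.getD i []]) wm
    else
      mergeLoopA conversations (i+1) (acc ++ [conversations.getD i []]) wm
  else
    (acc, wm)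
termination_by conversations.length - i

def merge_misplaced_thinking_blocks (conversations : List (List (String × String))) : (List (List (String × String))) × Bool :=
  mergeLoopA conversations 0 [] false

-- ===== PORT B =====
-- B's three-turn test on the full buffer (the if condition in Source B's loop body)
def altPattern (t1 t2 t3 : List (String × String)) : Bool :=
  let t2_val := PySem.Str.strip (PySem.Dict.getD ⟨t2⟩ "value" "")
  PySem.Dict.getD ⟨t1⟩ "from" "" == "gpt" &&
  PySem.Str.strip (PySem.Dict.getD ⟨t1⟩ "value" "") == "<thinking>" &&
  PySem.Dict.getD ⟨t2⟩ "from" "" == "human" &&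
  PySem.Str.endswith t2_val "</thinking>" &&
  !(PySem.Str.startswith t2_val "<thinking>") &&
  PySem.Dict.getD ⟨t3⟩ "from" "" == "gpt"

-- the merged gpt turn Source B appends on a match
def altMerged (t2 t3 : List (String × String)) : List (String × String) :=
  [("from","gpt"),
   ("value", "<thinking>" ++ "\n" ++ PySem.Str.strip (PySem.Dict.getD ⟨t2⟩ "value" "") ++ "\n" ++ PySem.Dict.getD ⟨t3⟩ "value" "")]

-- one iteration of Source B's for loop: push into the buffer; on a full buffer of
-- three, flush the merged turn or the oldest pending turn.
def altStep (st : (List (List (String × String))) × (List (List (String × String))) × Bool)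
    (turn : List (String × String)) :
    (List (List (String × String))) × (List (List (String × String))) × Bool :=
  let (out, buf, m) := st
  match buf ++ [turn] with
  | [t1, t2, t3] =>
      if altPattern t1 t2 t3 then (out ++ [altMerged t2 t3], [], true)
      else (out ++ [t1], [t2, t3], m)
  | buf' => (out, buf', m)

def merge_misplaced_thinking_blocks_alt (conversations : List (List (String × String))) : (List (List (String × String))) × Bool :=
  let (out, buf, m) := conversations.foldl altStep ([], [], false)
  (out ++ buf, m)

-- ===== PRECONDITION & SPEC =====
def Spec_merge_misplaced_thinking_blocks (conversations : List (List (String × String))) (out : (List (List (String × String))) × Bool) : Prop := out = merge_misplaced_thinking_blocks_alt conversations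
instance (conversations : List (List (String × String))) (out : (List (List (String × String))) × Bool) : Decidable (Spec_merge_misplaced_thinking_blocks conversations out) := by unfold Spec_merge_misplaced_thinking_blocks; infer_instance

-- ===== CLAIM (what is proved, stated in full; the proofs are below) =====
def Claim_equal_merge_misplaced_thinking_blocks : Prop := ∀ (conversations : List (List (String × String))), Dom_merge_misplaced_thinking_blocks conversations → Spec_merge_misplaced_thinking_blocks conversations (merge_misplaced_thinking_blocks conversations)

-- ===== LEMMAS AND PROOFS =====

-- Reference recursion both ports are reduced to: consume three turns on a match,
-- one otherwise; the flag is whether any match was consumed.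
def goSpec : List (List (String × String)) → (List (List (String × String))) × Bool
  | t1 :: t2 :: t3 :: rest =>
      if altPattern t1 t2 t3 then
        (altMerged t2 t3 :: (goSpec rest).1, true)
      else
        ((t1 :: (goSpec (t2 :: t3 :: rest)).1), (goSpec (t2 :: t3 :: rest)).2)
  | l => (l, false)
termination_by l => l.length

theorem goSpec_cons3 (t1 t2 t3 : List (String × String)) (rest : List (List (String × String))) :
    goSpec (t1 :: t2 :: t3 :: rest) =
      if altPattern t1 t2 t3 then (altMerged t2 t3 :: (goSpec rest).1, true)
      else ((t1 :: (goSpec (t2 :: t3 :: rest)).1), (goSpec (t2 :: t3 :: rest)).2) := by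
  rw [goSpec]

theorem goSpec_short (l : List (List (String × String))) (h : l.length ≤ 2) :
    goSpec l = (l, false) := by
  match l, h with
  | [], _ => rw [goSpec]; (intro t1 t2 t3 rest h; simp_all)
  | [a], _ => rw [goSpec]; (intro t1 t2 t3 rest h; simp_all)
  | [a, b], _ => rw [goSpec]; (intro t1 t2 t3 rest h; simp_all)

theorem drop_cons_getD (c : List (List (String × String))) (i : Nat) (h : i < c.length) :
    c.drop i = c.getD i [] :: c.drop (i+1) := by
  rw [List.getD_eq_getElem _ _ h, ← List.getElem_cons_drop h]

theorem mergeLoopA_eq (fuel : Nat) (c : List (List (String × String))) (i : Nat)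
    (acc : List (List (String × String))) (wm : Bool)
    (hf : c.length - i ≤ fuel) :
    mergeLoopA c i acc wm = (acc ++ (goSpec (c.drop i)).1, wm || (goSpec (c.drop i)).2) := by
  induction fuel generalizing i acc wm with
  | zero =>
    have hi : ¬ i < c.length := by omega
    have hd : c.drop i = [] := List.drop_eq_nil_of_le (by omega)
    rw [mergeLoopA]
    simp [hi, hd, goSpec_short]
  | succ fuel ih =>
    by_cases hi : i < c.length
    · by_cases h2 : i + 2 < c.length
      · have h1 : i + 1 < c.length := by omega
        have hd : c.drop i = c.getD i [] :: c.getD (i+1) [] :: c.getD (i+2) [] :: c.drop (i+3) := by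
          rw [drop_cons_getD c i hi, drop_cons_getD c (i+1) h1, drop_cons_getD c (i+2) h2]
        rw [mergeLoopA]
        simp only [hi, dif_pos, h2, if_pos]
        rw [hd, goSpec_cons3]
        by_cases hp : altPattern (c.getD i []) (c.getD (i+1) []) (c.getD (i+2) []) = true
        · have hp' : (PySem.Dict.getD ⟨c.getD i []⟩ "from" "" == "gpt" &&
              PySem.Str.strip (PySem.Dict.getD ⟨c.getD i []⟩ "value" "") == "<thinking>" &&
              PySem.Dict.getD ⟨c.getD (i+1) []⟩ "from" "" == "human" &&
              PySem.Str.endswith (PySem.Str.strip (PySem.Dict.getD ⟨c.getD (i+1) []⟩ "value" "")) "</thinking>" &&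
              !(PySem.Str.startswith (PySem.Str.strip (PySem.Dict.getD ⟨c.getD (i+1) []⟩ "value" "")) "<thinking>") &&
              PySem.Dict.getD ⟨c.getD (i+2) []⟩ "from" "" == "gpt") = true := by
            simpa [altPattern] using hp
          rw [if_pos hp', if_pos hp]
          rw [ih (i+3) _ true (by omega)]
          simp [altMerged]
        · have hp'' : altPattern (c.getD i []) (c.getD (i+1) []) (c.getD (i+2) []) = false := by
            simpa using hp
          have hp' : ¬ ((PySem.Dict.getD ⟨c.getD i []⟩ "from" "" == "gpt" &&
              PySem.Str.strip (PySem.Dict.getD ⟨c.getD i []⟩ "value" "") == "<thinking>" &&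
              PySem.Dict.getD ⟨c.getD (i+1) []⟩ "from" "" == "human" &&
              PySem.Str.endswith (PySem.Str.strip (PySem.Dict.getD ⟨c.getD (i+1) []⟩ "value" "")) "</thinking>" &&
              !(PySem.Str.startswith (PySem.Str.strip (PySem.Dict.getD ⟨c.getD (i+1) []⟩ "value" "")) "<thinking>") &&
              PySem.Dict.getD ⟨c.getD (i+2) []⟩ "from" "" == "gpt") = true) := by
            simpa [altPattern] using hp
          rw [if_neg hp', if_neg (by simpa [List.getD] using hp'')]
          rw [ih (i+1) _ wm (by omega)]
          rw [drop_cons_getD c (i+1) h1, drop_cons_getD c (i+2) h2]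
          simp
      · -- fewer than 3 turns remain: goSpec keeps them unchanged; A emits one and recurses
        rw [mergeLoopA]
        simp only [hi, dif_pos, h2, if_neg, not_false_iff]
        rw [ih (i+1) _ wm (by omega)]
        have hd : c.drop i = c.getD i [] :: c.drop (i+1) := drop_cons_getD c i hi
        have hlen : (c.drop (i+1)).length ≤ 1 := by
          simp only [List.length_drop]; omega
        rw [goSpec_short _ (by omega), goSpec_short _ (by rw [hd]; simp; omega), hd]
        simp
    · have hd : c.drop i = [] := List.drop_eq_nil_of_le (by omega)
      rw [mergeLoopA]
      simp [hi, hd, goSpec_short]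

theorem foldl_altStep_eq (c : List (List (String × String)))
    (out buf : List (List (String × String))) (m : Bool) (hb : buf.length ≤ 2) :
    (fun st => (st.1 ++ st.2.1, st.2.2)) (c.foldl altStep (out, buf, m)) =
      (out ++ (goSpec (buf ++ c)).1, m || (goSpec (buf ++ c)).2) := by
  induction c generalizing out buf m with
  | nil =>
    rw [List.append_nil, goSpec_short buf hb]
    simp
  | cons x c ih =>
    match buf, hb with
    | [], _ =>
      rw [List.foldl_cons]
      have hs : altStep (out, [], m) x = (out, [x], m) := rfl
      rw [hs, ih out [x] m (by simp)]
      simp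
    | [a], _ =>
      rw [List.foldl_cons]
      have hs : altStep (out, [a], m) x = (out, [a, x], m) := rfl
      rw [hs, ih out [a, x] m (by simp)]
      simp
    | [a, b], _ =>
      rw [List.foldl_cons]
      by_cases hp : altPattern a b x = true
      · have hs : altStep (out, [a, b], m) x = (out ++ [altMerged b x], [], true) := by
          simp [altStep, hp]
        rw [hs, ih _ [] true (by simp)]
        simp only [List.cons_append, List.nil_append]
        rw [goSpec_cons3, if_pos hp]
        simp
      · have hp' : altPattern a b x = false := by simpa using hp
        have hs : altStep (out, [a, b], m) x = (out ++ [a], [b, x], m) := by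
          simp [altStep, hp']
        rw [hs, ih _ [b, x] m (by simp)]
        simp only [List.cons_append, List.nil_append]
        rw [goSpec_cons3, if_neg (by simp [hp'])]
        simp

-- ===== VERDICT (by name: the statement is the Claim_ definition above) =====
theorem merge_misplaced_thinking_blocks_spec : Claim_equal_merge_misplaced_thinking_blocks := by
  intro c _
  unfold Spec_merge_misplaced_thinking_blocks merge_misplaced_thinking_blocks merge_misplaced_thinking_blocks_alt
  rw [mergeLoopA_eq c.length c 0 [] false (by omega), List.drop_zero]
  have h := foldl_altStep_eq c [] [] false (by simp)
  simp only [List.nil_append] at h ⊢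
  rw [← h]
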